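-- pv_equiv track=rewrite | github.com/AleksaIlicc/triggle | main.py | compute_game_metrics
-- ===== SOURCE A (Python) =====
-- def compute_game_metrics(dot_positions, n):
--     total_possible_moves = 0
--     triggles_needed_for_win = 0
--
--     for i, row in enumerate(dot_positions):
--         if i < n - 1:
--             triggles_needed_for_win += len(row) * 2 - 1
--         for j, dot in enumerate(row):
--             if j + 3 < len(row):
--                 total_possible_moves += 1
--
--     total_possible_moves *= 3
--     return total_possible_moves, triggles_needed_for_win
-- ===== SOURCE B (Python) =====
-- def compute_game_metrics(dot_positions, n):
--     total_possible_moves = 3 * sum(max(len(row) - 3, 0) for row in dot_positions)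
--     triggles_needed_for_win = sum(2 * len(row) - 1
--                                   for row in dot_positions[:max(n - 1, 0)])
--     return total_possible_moves, triggles_needed_for_win
-- ===== Notes on version B (the rewrite author's own statement) =====
-- stated objective: faster
-- what changed: Replaced the per-dot inner loop and the per-row index test with closed-form row sums: each row contributes 3*max(len(row)-3,0) moves, and the triggle count is summed over the first max(n-1,0) rows taken by a slice.
import Mathlib
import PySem

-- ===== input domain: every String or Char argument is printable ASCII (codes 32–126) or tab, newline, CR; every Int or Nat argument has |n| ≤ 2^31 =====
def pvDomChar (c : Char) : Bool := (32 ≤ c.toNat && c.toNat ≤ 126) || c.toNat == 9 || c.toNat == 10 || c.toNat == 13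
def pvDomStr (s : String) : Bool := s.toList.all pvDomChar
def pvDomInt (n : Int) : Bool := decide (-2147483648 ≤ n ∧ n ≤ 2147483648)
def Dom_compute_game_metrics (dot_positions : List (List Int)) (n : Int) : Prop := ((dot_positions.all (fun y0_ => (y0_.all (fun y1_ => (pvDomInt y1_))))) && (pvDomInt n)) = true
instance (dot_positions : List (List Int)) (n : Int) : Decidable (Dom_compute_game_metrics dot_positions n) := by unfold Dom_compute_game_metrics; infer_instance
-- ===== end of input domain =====

-- B replaces A's per-dot inner loop by a closed-form per-row contribution and the
-- per-row index test by a slice of the first max(n-1,0) rows (objective: faster, O(rows) vs O(dots)).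

-- ===== PORT A =====
-- literal transliteration of A: outer loop over enumerate(dot_positions) carrying
-- (total_possible_moves, triggles_needed_for_win), inner loop over enumerate(row).
def compute_game_metrics (dot_positions : List (List Int)) (n : Int) : Int × Int :=
  let st := (PySem.List.enumerate dot_positions).foldl
    (fun (acc : Int × Int) (p : Int × List Int) =>
      let t := if p.1 < n - 1 then acc.2 + ((p.2.length : Int) * 2 - 1) else acc.2
      let m := (PySem.List.enumerate p.2).foldl
        (fun (m : Int) (q : Int × Int) =>
          if q.1 + 3 < (p.2.length : Int) then m + 1 else m) acc.1
      (m, t)) (0, 0)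
  (st.1 * 3, st.2)

-- ===== PORT B =====
-- closed form: moves = 3 * Σ max(len(row)-3,0); triggles = Σ (2*len(row)-1) over dot_positions[:max(n-1,0)]
def compute_game_metrics_alt (dot_positions : List (List Int)) (n : Int) : Int × Int :=
  let moves := 3 * (dot_positions.map (fun r => max ((r.length : Int) - 3) 0)).sum
  let trig := ((dot_positions.take (max (n - 1) 0).toNat).map
                 (fun r => 2 * (r.length : Int) - 1)).sum
  (moves, trig)

-- ===== PRECONDITION & SPEC =====
def Spec_compute_game_metrics (dot_positions : List (List Int)) (n : Int) (out : Int × Int) : Prop := out = compute_game_metrics_alt dot_positions n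
instance (dot_positions : List (List Int)) (n : Int) (out : Int × Int) : Decidable (Spec_compute_game_metrics dot_positions n out) := by unfold Spec_compute_game_metrics; infer_instance

-- ===== CLAIM (what is proved, stated in full; the proofs are below) =====
def Claim_equal_compute_game_metrics : Prop := ∀ (dot_positions : List (List Int)) (n : Int), Dom_compute_game_metrics dot_positions n → Spec_compute_game_metrics dot_positions n (compute_game_metrics dot_positions n)

-- ===== LEMMAS AND PROOFS =====

-- A's inner loop counts the indices j with s+j+3 < L, clamped into [s, s+len).
theorem inner_count (L : Int) (row : List Int) : ∀ (s c : Int),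
    (PySem.List.enumerate row s).foldl
      (fun (m : Int) (q : Int × Int) => if q.1 + 3 < L then m + 1 else m) c
    = c + max 0 (min (L - 3) (s + row.length) - s) := by
  induction row with
  | nil => intro s c; simp [PySem.List.enumerate_nil]
  | cons x xs ih =>
    intro s c
    rw [PySem.List.enumerate_cons, List.foldl_cons, ih]
    simp only [List.length_cons]
    push_cast
    split_ifs with h <;> omega

-- A's outer loop, started at index s with accumulator acc, in closed form.
theorem outer_fold (n : Int) (dp : List (List Int)) : ∀ (s : Int) (acc : Int × Int),
    (PySem.List.enumerate dp s).foldl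
      (fun (acc : Int × Int) (p : Int × List Int) =>
        let t := if p.1 < n - 1 then acc.2 + ((p.2.length : Int) * 2 - 1) else acc.2
        let m := (PySem.List.enumerate p.2).foldl
          (fun (m : Int) (q : Int × Int) =>
            if q.1 + 3 < (p.2.length : Int) then m + 1 else m) acc.1
        (m, t)) acc
    = (acc.1 + (dp.map (fun r => max ((r.length : Int) - 3) 0)).sum,
       acc.2 + ((dp.take (max (n - 1 - s) 0).toNat).map
                  (fun r => 2 * (r.length : Int) - 1)).sum) := by
  induction dp with
  | nil => intro s acc; simp [PySem.List.enumerate_nil]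
  | cons r dp ih =>
    intro s acc
    rw [PySem.List.enumerate_cons, List.foldl_cons, ih]
    rw [inner_count]
    simp only [List.map_cons, List.sum_cons]
    by_cases h : s < n - 1
    · have h1 : (max (n - 1 - s) 0).toNat = ((max (n - 1 - (s + 1)) 0).toNat) + 1 := by omega
      rw [h1, List.take_succ_cons]
      simp only [List.map_cons, List.sum_cons, if_pos h]
      simp only [Prod.mk.injEq]
      constructor <;> omega
    · have h1 : (max (n - 1 - s) 0).toNat = 0 := by omega
      have h2 : (max (n - 1 - (s + 1)) 0).toNat = 0 := by omega
      rw [h1, h2]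
      simp only [List.take_zero, List.map_nil, List.sum_nil, if_neg h, Prod.mk.injEq]
      refine ⟨by omega, trivial⟩

-- ===== VERDICT (by name: the statement is the Claim_ definition above) =====
theorem compute_game_metrics_spec : Claim_equal_compute_game_metrics := by
  intro dp n _
  unfold Spec_compute_game_metrics compute_game_metrics compute_game_metrics_alt
  rw [outer_fold]
  simp only [zero_add]
  simp only [Prod.mk.injEq]
  constructor
  · ring
  · norm_num
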